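-- pv_equiv track=rewrite | github.com/LuckyIYI/SAD | backends/webgpu_py/train_wgpu.py | hilbert_bits_for_size
-- ===== SOURCE A (Python) =====
-- def hilbert_bits_for_size(width: int, height: int) -> int:
--     max_dim = max(width, height)
--     n = 1
--     bits = 0
--     while n < max_dim:
--         n <<= 1
--         bits += 1
--     return max(bits, 1)
-- ===== SOURCE B (Python) =====
-- def hilbert_bits_for_size(width: int, height: int) -> int:
--     m = max(width, height)
--     return 1 if m <= 1 else (m - 1).bit_length()
-- ===== Notes on version B (the rewrite author's own statement) =====
-- stated objective: idiomatic
-- what changed: Replaces the iterative bit-doubling loop with the closed form (m-1).bit_length() guarded by m <= 1.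
import Mathlib
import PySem

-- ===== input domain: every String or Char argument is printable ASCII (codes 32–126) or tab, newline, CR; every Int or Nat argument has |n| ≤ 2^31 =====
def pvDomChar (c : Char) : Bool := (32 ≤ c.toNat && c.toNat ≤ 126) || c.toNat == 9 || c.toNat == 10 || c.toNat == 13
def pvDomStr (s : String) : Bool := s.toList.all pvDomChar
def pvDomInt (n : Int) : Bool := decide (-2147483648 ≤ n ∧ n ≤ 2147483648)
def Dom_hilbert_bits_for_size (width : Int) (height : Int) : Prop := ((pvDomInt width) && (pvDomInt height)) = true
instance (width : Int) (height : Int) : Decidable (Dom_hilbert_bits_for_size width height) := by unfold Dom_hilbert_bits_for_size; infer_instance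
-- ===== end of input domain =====

-- B replaces A's iterative bit-doubling loop with the closed form (m-1).bit_length(),
-- guarded by m <= 1 (objective: idiomatic/closed form).

-- ===== PORT A =====
-- the while loop of A; the 1 ≤ n proof argument only justifies termination
def hilbertLoop (maxd : Int) (n : Int) (bits : Int) (hn : 1 ≤ n) : Int :=
  if h : n < maxd then hilbertLoop maxd (n * 2) (bits + 1) (by omega) else bits
termination_by (maxd - n).toNat
decreasing_by omega

def hilbert_bits_for_size (width : Int) (height : Int) : Int :=
  max (hilbertLoop (max width height) 1 0 (by omega)) 1

-- ===== PORT B =====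
-- (m-1).bit_length() for m ≥ 2 is exactly Nat.log2 (m-1).toNat + 1 (m-1 ≥ 1 there)
def hilbert_bits_for_size_alt (width : Int) (height : Int) : Int :=
  if max width height ≤ 1 then 1
  else ((Nat.log2 (max width height - 1).toNat + 1 : Nat) : Int)

-- ===== PRECONDITION & SPEC =====
def Spec_hilbert_bits_for_size (width : Int) (height : Int) (out : Int) : Prop := out = hilbert_bits_for_size_alt width height
instance (width : Int) (height : Int) (out : Int) : Decidable (Spec_hilbert_bits_for_size width height out) := by unfold Spec_hilbert_bits_for_size; infer_instance

-- ===== CLAIM (what is proved, stated in full; the proofs are below) =====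
def Claim_equal_hilbert_bits_for_size : Prop := ∀ (width : Int) (height : Int), Dom_hilbert_bits_for_size width height → Spec_hilbert_bits_for_size width height (hilbert_bits_for_size width height)

-- ===== LEMMAS AND PROOFS =====

theorem log2_of_lt_two {q : Nat} (h : q < 2) : Nat.log2 q = 0 := by
  rw [Nat.log2_def]
  simp [Nat.not_le.mpr h]

theorem log2_of_two_le {q : Nat} (h : 2 ≤ q) : Nat.log2 q = Nat.log2 (q / 2) + 1 := by
  conv_lhs => rw [Nat.log2_def]
  simp [h]

theorem hilbertLoop_eq_aux (k : Nat) : ∀ (maxd n bits : Int) (hn : 1 ≤ n), (maxd - n).toNat ≤ k →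
    hilbertLoop maxd n bits hn =
      if maxd ≤ n then bits
      else bits + ((Nat.log2 ((maxd - 1).toNat / n.toNat) + 1 : Nat) : Int) := by
  induction k with
  | zero =>
    intro maxd n bits hn hk
    rw [hilbertLoop, dif_neg (by omega : ¬ n < maxd), if_pos (by omega : maxd ≤ n)]
  | succ k ih =>
    intro maxd n bits hn hk
    rw [hilbertLoop]
    by_cases h : n < maxd
    · rw [dif_pos h, ih maxd (n * 2) (bits + 1) (by omega) (by omega),
        if_neg (by omega : ¬ maxd ≤ n)]
      by_cases h2 : maxd ≤ n * 2
      · -- one more doubling suffices: the quotient is 0 or 1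
        have hqlt : (maxd - 1).toNat / n.toNat < 2 :=
          Nat.div_lt_of_lt_mul (by omega)
        rw [if_pos h2, log2_of_lt_two hqlt]
        push_cast
        ring
      · have hn2 : (n * 2).toNat = n.toNat * 2 := by omega
        have hq2 : 2 ≤ (maxd - 1).toNat / n.toNat := by
          rw [Nat.le_div_iff_mul_le (by omega : 0 < n.toNat)]
          omega
        have key : Nat.log2 ((maxd - 1).toNat / n.toNat)
            = Nat.log2 ((maxd - 1).toNat / (n * 2).toNat) + 1 := by
          rw [hn2, ← Nat.div_div_eq_div_mul]
          exact log2_of_two_le hq2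
        rw [if_neg h2, key]
        push_cast
        ring
    · rw [dif_neg h, if_pos (by omega : maxd ≤ n)]

theorem hilbertLoop_eq (maxd n bits : Int) (hn : 1 ≤ n) :
    hilbertLoop maxd n bits hn =
      if maxd ≤ n then bits
      else bits + ((Nat.log2 ((maxd - 1).toNat / n.toNat) + 1 : Nat) : Int) :=
  hilbertLoop_eq_aux (maxd - n).toNat maxd n bits hn le_rfl

-- ===== VERDICT (by name: the statement is the Claim_ definition above) =====
theorem hilbert_bits_for_size_spec : Claim_equal_hilbert_bits_for_size := by
  intro width height _
  unfold Spec_hilbert_bits_for_size hilbert_bits_for_size hilbert_bits_for_size_alt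
  rw [hilbertLoop_eq]
  by_cases hm : max width height ≤ 1
  · rw [if_pos hm, if_pos hm]
    decide
  · simp only [if_neg hm, Int.toNat_one, Nat.div_one]
    omega
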